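-- pv_equiv track=rewrite | github.com/KiskinAlexander/-Algorithms-in-Python-3-Timofey-Khiryanov | 11 Практика - Динамическое программирование/Упражнение 2 - Кузнечик +1, +2, x3.py | grass_mov
-- ===== SOURCE A (Python) =====
-- def grass_mov(N):
--     K = [0, 1, 2, 4] + [0] * (N-3)
--     for i in range(4, N + 1):
--         if i % 3 == 0:
--             K[i] = K[int(i / 3)] + K[i - 2] + K[i - 1]
--         else:
--             K[i] = K[i - 2] + K[i - 1]
--     return K
-- ===== SOURCE B (Python) =====
-- def grass_mov(N):
--     cache = [0, 1, 2, 4] + [None] * (N - 3)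
--
--     def f(i):
--         if cache[i] is None:
--             cache[i] = f(i - 1) + f(i - 2) + (f(i // 3) if i % 3 == 0 else 0)
--         return cache[i]
--
--     for i in range(4, N + 1):
--         f(i)
--     return cache
-- ===== Notes on version B (the rewrite author's own statement) =====
-- stated objective: alternative
-- what changed: replaced A's bottom-up table fill with a top-down memoized recursive helper f(i) over a None-initialized cache, driven on demand
import Mathlib
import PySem

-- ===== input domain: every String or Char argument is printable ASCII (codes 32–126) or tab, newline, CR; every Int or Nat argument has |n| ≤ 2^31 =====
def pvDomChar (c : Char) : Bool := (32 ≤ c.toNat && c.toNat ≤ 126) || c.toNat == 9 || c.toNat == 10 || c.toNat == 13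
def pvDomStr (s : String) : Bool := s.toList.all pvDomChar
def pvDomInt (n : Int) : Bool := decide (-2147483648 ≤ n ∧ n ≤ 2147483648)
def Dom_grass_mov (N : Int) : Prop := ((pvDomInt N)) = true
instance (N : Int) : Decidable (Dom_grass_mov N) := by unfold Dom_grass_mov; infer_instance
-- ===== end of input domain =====

-- B replaces A's bottom-up preallocated table fill with top-down memoized recursion; same values, same cost (objective: alternative).

-- ===== PORT A =====
-- All K[i] reads/writes happen at indices 0 ≤ i ≤ N < len K, so the total forms pyGetD/pySetD are exact here.
-- int(i / 3) is ported as PySem.Int.truncdiv i 3, exact since |i| ≤ 2^31 < 2^53.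
def grass_mov (N : Int) : List Int :=
  let K : List Int := [0, 1, 2, 4] ++ List.replicate (N - 3).toNat 0
  (PySem.List.pyRange 4 (N + 1) 1).foldl
    (fun K i =>
      if PySem.Int.mod i 3 == 0 then
        PySem.List.pySetD K i
          (PySem.List.pyGetD K (PySem.Int.truncdiv i 3) 0 + PySem.List.pyGetD K (i - 2) 0 +
            PySem.List.pyGetD K (i - 1) 0)
      else
        PySem.List.pySetD K i (PySem.List.pyGetD K (i - 2) 0 + PySem.List.pyGetD K (i - 1) 0))
    K

-- ===== PORT B =====
-- Source B's memoized recursive helper f, with the cache list threaded explicitly (entries int-or-None =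
-- Option Int). f is only applied to 0 ≤ i < len cache (4 ≤ i ≤ N from the driving loop, then i-1, i-2,
-- i//3), so it takes a Nat (the driver passes i.toNat); 'fuel' only bounds the recursion depth to make
-- the same computation total — the callers below supply i+1 fuel, which never runs out (proved).
def fcache (fuel : Nat) (i : Nat) (c : List (Option Int)) : Int × List (Option Int) :=
  match fuel with
  | 0 => (0, c)
  | fuel + 1 =>
    match PySem.List.pyGetD c (i : Int) none with
    | some v => (v, c)
    | none =>
      let p1 := fcache fuel (i - 1) c
      let p2 := fcache fuel (i - 2) p1.2
      let p3 := if i % 3 == 0 then fcache fuel (i / 3) p2.2 else ((0 : Int), p2.2)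
      let v := p1.1 + p2.1 + p3.1
      (v, PySem.List.pySetD p3.2 (i : Int) (some v))

-- On return every cache entry is an int (proved below), unwrapped here to land in List Int.
def grass_mov_alt (N : Int) : List Int :=
  let c0 : List (Option Int) := [some 0, some 1, some 2, some 4] ++ List.replicate (N - 3).toNat none
  let c := (PySem.List.pyRange 4 (N + 1) 1).foldl (fun c i => (fcache (i.toNat + 1) i.toNat c).2) c0
  c.map (fun o => o.getD 0)

-- ===== PRECONDITION & SPEC =====
def Spec_grass_mov (N : Int) (out : List Int) : Prop := out = grass_mov_alt N
instance (N : Int) (out : List Int) : Decidable (Spec_grass_mov N out) := by unfold Spec_grass_mov; infer_instance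

-- ===== CLAIM (what is proved, stated in full; the proofs are below) =====
def Claim_equal_grass_mov : Prop := ∀ (N : Int), Dom_grass_mov N → Spec_grass_mov N (grass_mov N)

-- ===== LEMMAS AND PROOFS =====

-- Specification function: the value of the sequence at index i (proof-level; neither port computes with it).
def grassB (i : Nat) : Int :=
  if i = 0 then 0
  else if i = 1 then 1
  else if i = 2 then 2
  else if i = 3 then 4
  else grassB (i - 1) + grassB (i - 2) + (if i % 3 == 0 then grassB (i / 3) else 0)
termination_by i
decreasing_by
  · omega
  · omega
  · exact Nat.div_lt_self (by omega) (by omega)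


-- The loop body of A, abstracted.
def grassStep (K : List Int) (i : Int) : List Int :=
  if PySem.Int.mod i 3 == 0 then
    PySem.List.pySetD K i
      (PySem.List.pyGetD K (PySem.Int.truncdiv i 3) 0 + PySem.List.pyGetD K (i - 2) 0 +
        PySem.List.pyGetD K (i - 1) 0)
  else
    PySem.List.pySetD K i (PySem.List.pyGetD K (i - 2) 0 + PySem.List.pyGetD K (i - 1) 0)

-- Unfolding of grassB at an argument ≥ 4.
theorem grassB_ge_four (m : Nat) (hm : 4 ≤ m) :
    grassB m = grassB (m - 1) + grassB (m - 2) + (if m % 3 == 0 then grassB (m / 3) else 0) := by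
  rw [grassB]
  simp only [if_neg (by omega : ¬ m = 0), if_neg (by omega : ¬ m = 1),
    if_neg (by omega : ¬ m = 2), if_neg (by omega : ¬ m = 3)]

-- Reading inside the mapped prefix of a table (shared by both ports' invariants).
theorem read_prefix {α : Type} (f : Int → α) (d : α) (j m : Int) (t : List α) (hm0 : 0 ≤ m)
    (hmj : m < j) :
    PySem.List.pyGetD ((PySem.List.pyRange 0 j 1).map f ++ t) m d = f m := by
  have hlen : ((PySem.List.pyRange 0 j 1).map f).length = j.toNat := by
    simp [PySem.List.length_pyRange_one]
  have hb : m < ((((PySem.List.pyRange 0 j 1).map f) ++ t).length : Int) := by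
    rw [List.length_append, hlen]
    push_cast
    omega
  rw [PySem.List.pyGetD_eq_getElem _ d hm0 hb]
  rw [List.getElem_append_left (by omega)]
  rw [List.getElem_map]
  rw [PySem.List.getElem_pyRange_one]
  simp [Int.toNat_of_nonneg hm0]

-- One loop step sends the state filled up to j to the state filled up to j+1.
theorem step_advance (n j : Int) (hj : 3 ≤ j) (hjn : j < n) :
    grassStep ((PySem.List.pyRange 0 (j + 1) 1).map (fun i => grassB i.toNat) ++
        List.replicate (n - j).toNat 0) (j + 1)
      = (PySem.List.pyRange 0 (j + 2) 1).map (fun i => grassB i.toNat) ++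
        List.replicate (n - (j + 1)).toNat 0 := by
  set A := (PySem.List.pyRange 0 (j + 1) 1).map (fun i => grassB i.toNat) with hA
  have hAlen : A.length = (j + 1).toNat := by
    simp [hA, PySem.List.length_pyRange_one]
  have hrep : List.replicate (n - j).toNat (0 : Int)
      = 0 :: List.replicate (n - (j + 1)).toNat 0 := by
    have h : (n - j).toNat = (n - (j + 1)).toNat + 1 := by omega
    rw [h, List.replicate_succ]
  have hval3 : PySem.Int.mod (j + 1) 3 == 0 →
      PySem.Int.truncdiv (j + 1) 3 = (((j + 1).toNat / 3 : Nat) : Int) := by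
    intro _
    unfold PySem.Int.truncdiv
    rw [Int.tdiv_eq_ediv_of_nonneg (by omega)]
    omega
  have hmod : (PySem.Int.mod (j + 1) 3 == 0) = ((j + 1).toNat % 3 == 0) := by
    rw [PySem.Int.mod_eq_emod_of_pos (by omega : (0:Int) < 3)]
    by_cases h : (j + 1) % 3 = 0 <;> simp [h] <;> omega
  have hread : ∀ m : Int, 0 ≤ m → m < j + 1 →
      PySem.List.pyGetD (A ++ List.replicate (n - j).toNat 0) m 0 = grassB m.toNat := by
    intro m h0 h1
    exact read_prefix _ 0 (j + 1) m _ h0 h1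
  have hv : (if PySem.Int.mod (j + 1) 3 == 0 then
        PySem.List.pyGetD (A ++ List.replicate (n - j).toNat 0) (PySem.Int.truncdiv (j + 1) 3) 0 +
          PySem.List.pyGetD (A ++ List.replicate (n - j).toNat 0) (j + 1 - 2) 0 +
          PySem.List.pyGetD (A ++ List.replicate (n - j).toNat 0) (j + 1 - 1) 0
      else
        PySem.List.pyGetD (A ++ List.replicate (n - j).toNat 0) (j + 1 - 2) 0 +
          PySem.List.pyGetD (A ++ List.replicate (n - j).toNat 0) (j + 1 - 1) 0)
      = grassB (j + 1).toNat := by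
    rw [grassB_ge_four (j + 1).toNat (by omega)]
    have e1 : (j + 1 - 1).toNat = (j + 1).toNat - 1 := by omega
    have e2 : (j + 1 - 2).toNat = (j + 1).toNat - 2 := by omega
    by_cases h3 : PySem.Int.mod (j + 1) 3 == 0
    · rw [if_pos h3, hval3 h3]
      have hd : ((((j + 1).toNat / 3 : Nat)) : Int) < j + 1 := by omega
      rw [hread _ (by omega) hd, hread (j + 1 - 2) (by omega) (by omega),
        hread (j + 1 - 1) (by omega) (by omega)]
      have h3' : ((j + 1).toNat % 3 == 0) = true := by rw [← hmod]; exact h3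
      rw [if_pos h3', e1, e2, Int.toNat_natCast]
      ring
    · rw [if_neg h3]
      rw [hread (j + 1 - 2) (by omega) (by omega), hread (j + 1 - 1) (by omega) (by omega)]
      have h3' : ¬ ((j + 1).toNat % 3 == 0) = true := by rw [← hmod]; exact h3
      rw [if_neg h3', e1, e2]
      ring
  have hset : ∀ v : Int,
      PySem.List.pySetD (A ++ List.replicate (n - j).toNat 0) (j + 1) v
        = A ++ v :: List.replicate (n - (j + 1)).toNat 0 := by
    intro v
    rw [PySem.List.pySetD_of_nonneg _ _ (by omega), hrep, ← hAlen]
    simp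
  have hnext : (PySem.List.pyRange 0 (j + 2) 1).map (fun i => grassB i.toNat)
      = A ++ [grassB (j + 1).toNat] := by
    have h : (j : Int) + 2 = (j + 1) + 1 := by ring
    rw [h, PySem.List.pyRange_one_succ_right (by omega : (0:Int) ≤ j + 1), List.map_append]
    simp [hA]
  unfold grassStep
  by_cases h3 : PySem.Int.mod (j + 1) 3 == 0
  · rw [if_pos h3, hset, hnext, List.append_assoc]
    rw [if_pos h3] at hv
    rw [hv]
    rfl
  · rw [if_neg h3, hset, hnext, List.append_assoc]
    rw [if_neg h3] at hv
    rw [hv]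
    rfl

-- Loop invariant: folding the remaining range over a table filled up to j yields the full table.
theorem loop_inv (k : Nat) : ∀ (n j : Int), 3 ≤ j → j ≤ n → (n - j).toNat = k →
    (PySem.List.pyRange (j + 1) (n + 1) 1).foldl grassStep
        ((PySem.List.pyRange 0 (j + 1) 1).map (fun i => grassB i.toNat) ++
          List.replicate (n - j).toNat 0)
      = (PySem.List.pyRange 0 (n + 1) 1).map (fun i => grassB i.toNat) := by
  induction k with
  | zero =>
    intro n j hj hjn hk
    have hnj : n = j := by omega
    subst hnj
    rw [PySem.List.pyRange_one_eq_nil (le_refl (n + 1)), hk]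
    simp
  | succ k ih =>
    intro n j hj hjn hk
    have hlt : j < n := by omega
    rw [PySem.List.pyRange_one_cons (by omega : j + 1 < n + 1)]
    rw [List.foldl_cons]
    rw [step_advance n j hj hlt]
    have e : (j : Int) + 2 = j + 1 + 1 := by ring
    rw [e]
    exact ih n (j + 1) (by omega) (by omega) (by omega)

-- Base values of grassB, by one unfolding each.
theorem grassB_zero : grassB 0 = 0 := by rw [grassB]; norm_num
theorem grassB_one : grassB 1 = 1 := by rw [grassB]; norm_num
theorem grassB_two : grassB 2 = 2 := by rw [grassB]; norm_num
theorem grassB_three : grassB 3 = 4 := by rw [grassB]; norm_num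

-- The initial table [0,1,2,4] is the filled table up to 3.
theorem init_table : (PySem.List.pyRange 0 4 1).map (fun i => grassB i.toNat)
    = ([0, 1, 2, 4] : List Int) := by
  have h : PySem.List.pyRange 0 4 1 = [0, 1, 2, 3] := by decide
  rw [h]
  simp [List.map]
  norm_num [grassB_zero, grassB_one, grassB_two, grassB_three]

-- The some-mapped initial table of B.
theorem init_table_opt : (PySem.List.pyRange 0 4 1).map (fun i => some (grassB i.toNat))
    = ([some 0, some 1, some 2, some 4] : List (Option Int)) := by
  have h : PySem.List.pyRange 0 4 1 = [0, 1, 2, 3] := by decide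
  rw [h]
  simp [List.map]
  norm_num [grassB_zero, grassB_one, grassB_two, grassB_three]

-- Reading the first unfilled slot right after the prefix.
theorem read_sentinel {α : Type} (A t : List α) (x d : α) :
    PySem.List.pyGetD (A ++ x :: t) ((A.length : Nat) : Int) d = x := by
  rw [PySem.List.pyGetD_natCast]
  simp [List.getD_eq_getElem?_getD]

-- A cached index returns immediately without touching the cache.
theorem fcache_cached (fuel i : Nat) (hf : 1 ≤ fuel) (c : List (Option Int)) (v : Int)
    (h : PySem.List.pyGetD c (i : Int) none = some v) : fcache fuel i c = (v, c) := by
  match fuel, hf with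
  | f + 1, _ => simp only [fcache, h]

-- B's cache after the driving loop has reached j (3 ≤ j ≤ n).
def cState (n j : Int) : List (Option Int) :=
  (PySem.List.pyRange 0 (j + 1) 1).map (fun i => some (grassB i.toNat)) ++
    List.replicate (n - j).toNat none

-- One demand-driven call advances the cache by one slot (all sub-calls hit the cache).
theorem fcache_advance (n j : Int) (hj : 3 ≤ j) (hjn : j < n) :
    fcache ((j + 1).toNat + 1) (j + 1).toNat (cState n j)
      = (grassB (j + 1).toNat, cState n (j + 1)) := by
  set A := (PySem.List.pyRange 0 (j + 1) 1).map (fun i => some (grassB i.toNat)) with hA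
  have hAlen : A.length = (j + 1).toNat := by
    simp [hA, PySem.List.length_pyRange_one]
  have hrep : List.replicate (n - j).toNat (none : Option Int)
      = none :: List.replicate (n - (j + 1)).toNat none := by
    have h : (n - j).toNat = (n - (j + 1)).toNat + 1 := by omega
    rw [h, List.replicate_succ]
  have hmiss : PySem.List.pyGetD (cState n j) (((j + 1).toNat : Nat) : Int) none = none := by
    unfold cState
    rw [← hA, hrep, ← hAlen]
    exact read_sentinel A _ none none
  have hhit : ∀ m : Nat, (m : Int) < j + 1 →
      PySem.List.pyGetD (cState n j) (m : Int) none = some (grassB m) := by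
    intro m hm
    unfold cState
    rw [read_prefix (fun i => some (grassB i.toNat)) none (j + 1) (m : Int) _ (by omega) hm]
    simp
  set i := (j + 1).toNat with hi
  have hi4 : 4 ≤ i := by omega
  rw [fcache]
  rw [hmiss]
  simp only []
  rw [fcache_cached i (i - 1) (by omega) _ _ (hhit (i - 1) (by omega))]
  rw [fcache_cached i (i - 2) (by omega) _ _ (hhit (i - 2) (by omega))]
  have hdiv : ((i / 3 : Nat) : Int) < j + 1 := by
    have := Nat.div_lt_self (show 0 < i by omega) (show 1 < 3 by omega)
    omega
  have hp3 : (if i % 3 == 0 then fcache i (i / 3) (cState n j) else ((0 : Int), cState n j))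
      = ((if i % 3 == 0 then grassB (i / 3) else 0), cState n j) := by
    by_cases hm3 : i % 3 == 0
    · rw [if_pos hm3, if_pos hm3, fcache_cached i (i / 3) (by omega) _ _ (hhit (i / 3) hdiv)]
    · rw [if_neg hm3, if_neg hm3]
  rw [hp3]
  simp only []
  rw [← grassB_ge_four i hi4]
  have hsetEq : PySem.List.pySetD (cState n j) (i : Int) (some (grassB i)) = cState n (j + 1) := by
    unfold cState
    rw [← hA, hrep, PySem.List.pySetD_of_nonneg _ _ (by omega)]
    rw [Int.toNat_natCast, ← hAlen]
    have hs : (A ++ none :: List.replicate (n - (j + 1)).toNat none).set A.length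
        (some (grassB A.length)) = A ++ some (grassB A.length) ::
          List.replicate (n - (j + 1)).toNat none := by
      simp
    rw [hs]
    have hnext : (PySem.List.pyRange 0 (j + 1 + 1) 1).map (fun k => some (grassB k.toNat))
        = A ++ [some (grassB A.length)] := by
      rw [PySem.List.pyRange_one_succ_right (by omega : (0:Int) ≤ j + 1), List.map_append]
      simp [hA]
    rw [hnext, List.append_assoc]
    rfl
  rw [hsetEq]

-- Driving loop invariant for B.
theorem loop_inv_b (k : Nat) : ∀ (n j : Int), 3 ≤ j → j ≤ n → (n - j).toNat = k →
    (PySem.List.pyRange (j + 1) (n + 1) 1).foldl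
        (fun c i => (fcache (i.toNat + 1) i.toNat c).2) (cState n j)
      = cState n n := by
  induction k with
  | zero =>
    intro n j hj hjn hk
    have hnj : n = j := by omega
    subst hnj
    rw [PySem.List.pyRange_one_eq_nil (le_refl (n + 1))]
    rfl
  | succ k ih =>
    intro n j hj hjn hk
    have hlt : j < n := by omega
    rw [PySem.List.pyRange_one_cons (by omega : j + 1 < n + 1), List.foldl_cons]
    have h := fcache_advance n j hj hlt
    simp only [h]
    exact ih n (j + 1) (by omega) (by omega) (by omega)

-- ===== VERDICT (by name: the statement is the Claim_ definition above) =====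
theorem grass_mov_spec : Claim_equal_grass_mov := by
  intro N _
  simp only [Spec_grass_mov, grass_mov, grass_mov_alt]
  by_cases hN : N < 3
  · have h1 : (N - 3).toNat = 0 := by omega
    rw [PySem.List.pyRange_one_eq_nil (by omega : N + 1 ≤ 4), h1]
    simp
  · show (PySem.List.pyRange 4 (N + 1) 1).foldl grassStep
        ([0, 1, 2, 4] ++ List.replicate (N - 3).toNat 0) = _
    have hA := loop_inv (N - 3).toNat N 3 (by omega) (by omega) rfl
    rw [show (3 : Int) + 1 = 4 from by norm_num, init_table] at hA
    rw [hA]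
    have hB := loop_inv_b (N - 3).toNat N 3 (by omega) (by omega) rfl
    unfold cState at hB
    rw [show (3 : Int) + 1 = 4 from by norm_num, init_table_opt] at hB
    rw [hB]
    have h0 : (N - N).toNat = 0 := by omega
    rw [h0]
    simp [List.map_map, Function.comp]
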